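-- pv_equiv track=rewrite | github.com/KumarAmbuj/gfg_string_arithematic_operation | 26.mark as difficulty and easy.py | finddifficulty
-- ===== SOURCE A (Python) =====
-- def finddifficulty(s):
--     l=s.split()
--     vowel='aeiouAEIOU'
--     dif=0
--     easy=0
--
--     for x in l:
--         prev=''
--         cons = 0
--         vow = 0
--         ans=0
--         for i in x:
--             if i not in vowel:
--                 prev=prev+i
--                 cons+=1
--             else:
--                 ans=max(ans,len(prev))
--                 vow+=1
--                 prev=''
--         ans=max(ans,len(prev))
--
--         if ans>=4 or cons>vow:
--             dif+=1
--         else: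
--             easy+=1
--     res=5*dif+3*easy
--     return res
-- ===== SOURCE B (Python) =====
-- def finddifficulty(s):
--     vowels = 'aeiouAEIOU'
--     total = 0
--     for w in s.split():
--         runs = ''.join(' ' if c in vowels else c for c in w).split()
--         cons = sum(1 for c in w if c not in vowels)
--         longest = max((len(r) for r in runs), default=0)
--         total += 5 if longest >= 4 or cons > len(w) - cons else 3
--     return total
-- ===== Notes on version B (the rewrite author's own statement) =====
-- stated objective: idiomatic
-- what changed: Replaced A's fused per-character state machine (prev string, running max, interleaved counters) with a build-then-reduce decomposition per word: map vowels to spaces and split the word into its consonant runs, then classify from the max run length and a consonant count.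
import Mathlib
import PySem

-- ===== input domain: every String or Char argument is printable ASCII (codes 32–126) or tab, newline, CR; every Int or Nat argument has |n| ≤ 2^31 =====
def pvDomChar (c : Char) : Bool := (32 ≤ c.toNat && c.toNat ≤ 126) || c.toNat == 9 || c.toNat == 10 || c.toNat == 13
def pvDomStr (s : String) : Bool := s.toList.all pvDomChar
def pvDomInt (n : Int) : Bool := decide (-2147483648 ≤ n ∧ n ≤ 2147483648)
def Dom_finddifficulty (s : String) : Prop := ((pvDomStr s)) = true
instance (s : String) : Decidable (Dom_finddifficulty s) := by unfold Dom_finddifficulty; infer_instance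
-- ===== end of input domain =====

-- B replaces A's fused per-character state machine (prev string, running max) by an
-- idiomatic build-then-reduce decomposition: map vowels to spaces, split into consonant
-- runs, then take the max run length and a consonant count.


-- Python `i in 'aeiouAEIOU'` for a single character = membership in that list of chars
def pvVowel (c : Char) : Bool := c ∈ ['a','e','i','o','u','A','E','I','O','U']

-- ===== PORT A =====
-- inner loop body: state (prev, cons, vow, ans)
def finddifficultyStepA (st : List Char × Int × Int × Nat) (i : Char) : List Char × Int × Int × Nat :=
  if !(pvVowel i) then (st.1 ++ [i], st.2.1 + 1, st.2.2.1, st.2.2.2)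
  else ([], st.2.1, st.2.2.1 + 1, max st.2.2.2 st.1.length)

-- body of the outer `for x in l`, accumulating (dif, easy)
def finddifficultyAccA (p : Int × Int) (x : List Char) : Int × Int :=
  let st := x.foldl finddifficultyStepA ([], 0, 0, 0)
  let ans := max st.2.2.2 st.1.length
  if 4 ≤ ans ∨ st.2.2.1 < st.2.1 then (p.1 + 1, p.2) else (p.1, p.2 + 1)

def finddifficulty (s : String) : Int :=
  let l := PySem.Str.split₀ s
  let p := l.foldl (fun p x => finddifficultyAccA p x.toList) (0, 0)
  5 * p.1 + 3 * p.2

-- ===== PORT B =====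
def pvSub (c : Char) : Char := if pvVowel c then ' ' else c

-- per-word body of B: runs / cons / longest, then add 5 or 3
def finddifficultyWordB (total : Int) (wc : List Char) : Int :=
  let runs := PySem.Chars.split₀ (wc.map pvSub)
  let cons : Int := ((wc.countP (fun c => !pvVowel c) : Nat) : Int)
  let longest : Nat := (runs.map List.length).foldl max 0
  total + (if 4 ≤ longest ∨ (wc.length : Int) - cons < cons then 5 else 3)

def finddifficulty_alt (s : String) : Int :=
  (PySem.Str.split₀ s).foldl (fun t w => finddifficultyWordB t w.toList) 0

-- ===== PRECONDITION & SPEC =====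
def Spec_finddifficulty (s : String) (out : Int) : Prop := out = finddifficulty_alt s
instance (s : String) (out : Int) : Decidable (Spec_finddifficulty s out) := by unfold Spec_finddifficulty; infer_instance

-- ===== CLAIM (what is proved, stated in full; the proofs are below) =====
def Claim_equal_finddifficulty : Prop := ∀ (s : String), Dom_finddifficulty s → Spec_finddifficulty s (finddifficulty s)

-- ===== LEMMAS AND PROOFS =====

-- the three defining equations of PySem.Chars.split₀.go, stated as rewrite rules
theorem pv_go_nil (cur : List Char) (acc : List (List Char)) :
    PySem.Chars.split₀.go [] cur acc
      = if cur.isEmpty then acc.reverse else (cur.reverse :: acc).reverse := by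
  rw [PySem.Chars.split₀.go.eq_def]

theorem pv_go_cons_space (c : Char) (hc : PySem.Chars.isspace c = true)
    (rest cur : List Char) (acc : List (List Char)) :
    PySem.Chars.split₀.go (c :: rest) cur acc
      = if cur.isEmpty then PySem.Chars.split₀.go rest [] acc
        else PySem.Chars.split₀.go rest [] (cur.reverse :: acc) := by
  rw [PySem.Chars.split₀.go.eq_def]; simp [hc]

theorem pv_go_cons_nonspace (c : Char) (hc : PySem.Chars.isspace c = false)
    (rest cur : List Char) (acc : List (List Char)) :
    PySem.Chars.split₀.go (c :: rest) cur acc = PySem.Chars.split₀.go rest (c :: cur) acc := by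
  rw [PySem.Chars.split₀.go.eq_def]; simp [hc]

-- split₀.go's accumulator only prepends already-finished words
theorem pv_go_acc (xs : List Char) : ∀ (cur : List Char) (acc : List (List Char)),
    PySem.Chars.split₀.go xs cur acc = acc.reverse ++ PySem.Chars.split₀.go xs cur [] := by
  induction xs with
  | nil =>
    intro cur acc
    rw [pv_go_nil, pv_go_nil]
    by_cases h : cur.isEmpty <;> simp [h]
  | cons c rest ih =>
    intro cur acc
    by_cases hs : PySem.Chars.isspace c = true
    · rw [pv_go_cons_space c hs, pv_go_cons_space c hs]
      by_cases h : cur.isEmpty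
      · rw [if_pos h, if_pos h, ih [] acc]
      · rw [if_neg h, if_neg h, ih [] (cur.reverse :: acc), ih [] [cur.reverse]]
        simp
    · have hs' : PySem.Chars.isspace c = false := Bool.eq_false_iff.mpr hs
      rw [pv_go_cons_nonspace c hs', pv_go_cons_nonspace c hs', ih (c :: cur) acc]

-- every word produced by split₀.go is whitespace-free (given whitespace-free seeds)
theorem pv_go_nospace (xs : List Char) : ∀ (cur : List Char) (acc : List (List Char)),
    (∀ c ∈ cur, PySem.Chars.isspace c = false) →
    (∀ u ∈ acc, ∀ c ∈ u, PySem.Chars.isspace c = false) →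
    ∀ u ∈ PySem.Chars.split₀.go xs cur acc, ∀ c ∈ u, PySem.Chars.isspace c = false := by
  induction xs with
  | nil =>
    intro cur acc hcur hacc
    rw [pv_go_nil]
    by_cases h : cur.isEmpty <;> simp only [h, if_true, if_false, Bool.false_eq_true]
    · intro u hu; exact hacc u (by simpa using hu)
    · intro u hu
      rcases List.mem_cons.mp (List.mem_reverse.mp hu) with h1 | h2
      · subst h1; intro c hc; exact hcur c (List.mem_reverse.mp hc)
      · exact hacc u h2
  | cons c rest ih =>
    intro cur acc hcur hacc
    by_cases hs : PySem.Chars.isspace c = true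
    · rw [pv_go_cons_space c hs]
      by_cases h : cur.isEmpty <;> simp only [h, if_true, if_false, Bool.false_eq_true]
      · exact ih [] acc (by simp) hacc
      · refine ih [] (cur.reverse :: acc) (by simp) ?_
        intro u hu
        rcases List.mem_cons.mp hu with h1 | h2
        · subst h1; intro d hd; exact hcur d (List.mem_reverse.mp hd)
        · exact hacc u h2
    · have hs' : PySem.Chars.isspace c = false := Bool.eq_false_iff.mpr hs
      rw [pv_go_cons_nonspace c hs']
      refine ih (c :: cur) acc ?_ hacc
      intro d hd
      rcases List.mem_cons.mp hd with h1 | h2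
      · subst h1; exact hs'
      · exact hcur d h2

theorem pv_split₀_nospace (xs : List Char) :
    ∀ u ∈ PySem.Chars.split₀ xs, ∀ c ∈ u, PySem.Chars.isspace c = false :=
  pv_go_nospace xs [] [] (by simp) (by simp)

-- main inner-loop invariant: A's fused scan state vs B's runs-of-consonants view
theorem pv_inner (w : List Char) (hw : ∀ c ∈ w, PySem.Chars.isspace c = false) :
    ∀ (prev : List Char) (cons vow : Int) (ans : Nat),
    max (w.foldl finddifficultyStepA (prev, cons, vow, ans)).2.2.2
        (w.foldl finddifficultyStepA (prev, cons, vow, ans)).1.length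
      = ((PySem.Chars.split₀.go (w.map pvSub) prev.reverse []).map List.length).foldl max ans
    ∧ (w.foldl finddifficultyStepA (prev, cons, vow, ans)).2.1
      = cons + ((w.countP (fun c => !pvVowel c) : Nat) : Int)
    ∧ (w.foldl finddifficultyStepA (prev, cons, vow, ans)).2.2.1
      = vow + ((w.countP (fun c => pvVowel c) : Nat) : Int) := by
  induction w with
  | nil =>
    intro prev cons vow ans
    simp only [List.map_nil, List.foldl_nil, List.countP_nil]
    rw [pv_go_nil]
    by_cases h : prev = []
    · subst h; simp
    · have h1 : prev.reverse.isEmpty = false := by simp [h]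
      simp [h1]
  | cons c rest ih =>
    intro prev cons vow ans
    have hwrest : ∀ d ∈ rest, PySem.Chars.isspace d = false :=
      fun d hd => hw d (List.mem_cons_of_mem _ hd)
    by_cases hv : pvVowel c = true
    · -- vowel: sub c = ' ' (whitespace); A resets prev, bumps vow, folds prev into ans
      have hstep : finddifficultyStepA (prev, cons, vow, ans) c
          = ([], cons, vow + 1, max ans prev.length) := by
        simp [finddifficultyStepA, hv]
      have hsub : pvSub c = ' ' := by simp [pvSub, hv]
      have hsp : PySem.Chars.isspace ' ' = true := by decide
      rw [List.foldl_cons, hstep]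
      obtain ⟨ih1, ih2, ih3⟩ := ih hwrest [] cons (vow + 1) (max ans prev.length)
      refine ⟨?_, ?_, ?_⟩
      · rw [ih1, List.map_cons, hsub, pv_go_cons_space _ hsp]
        by_cases h : prev = []
        · subst h; simp
        · have h1 : prev.reverse.isEmpty = false := by simp [h]
          rw [if_neg (by simp [h1]), List.reverse_reverse,
            pv_go_acc (rest.map pvSub) [] [prev]]
          simp
      · rw [ih2, List.countP_cons]; simp [hv]
      · rw [ih3, List.countP_cons]; simp [hv]; omega
    · -- consonant: sub c = c, not whitespace; A extends prev, bumps cons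
      have hstep : finddifficultyStepA (prev, cons, vow, ans) c
          = (prev ++ [c], cons + 1, vow, ans) := by
        simp [finddifficultyStepA, hv]
      have hsub : pvSub c = c := by simp [pvSub, hv]
      have hsp : PySem.Chars.isspace c = false := hw c List.mem_cons_self
      rw [List.foldl_cons, hstep]
      obtain ⟨ih1, ih2, ih3⟩ := ih hwrest (prev ++ [c]) (cons + 1) vow ans
      refine ⟨?_, ?_, ?_⟩
      · rw [ih1, List.map_cons, hsub, pv_go_cons_nonspace c hsp]
        simp
      · rw [ih2, List.countP_cons]; simp [hv]; omega
      · rw [ih3, List.countP_cons]; simp [hv]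

-- per word (whitespace-free), B's increment matches A's (dif, easy) update
theorem pv_word (w : List Char) (hw : ∀ c ∈ w, PySem.Chars.isspace c = false)
    (d e : Int) :
    finddifficultyWordB (5 * d + 3 * e) w
      = 5 * (finddifficultyAccA (d, e) w).1 + 3 * (finddifficultyAccA (d, e) w).2 := by
  obtain ⟨h1, h2, h3⟩ := pv_inner w hw [] 0 0 0
  have hlen : w.length = w.countP (fun c => pvVowel c) + w.countP (fun c => !pvVowel c) := by
    have := List.length_eq_countP_add_countP (fun c => pvVowel c) (l := w)
    have hc : w.countP (fun a => decide ¬(pvVowel a = true)) = w.countP (fun c => !pvVowel c) := by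
      apply List.countP_congr; intro a _; simp
    omega
  have hgo : PySem.Chars.split₀ (w.map pvSub) = PySem.Chars.split₀.go (w.map pvSub) [] [] := rfl
  have hcond : (4 ≤ max (w.foldl finddifficultyStepA ([], 0, 0, 0)).2.2.2
        (w.foldl finddifficultyStepA ([], 0, 0, 0)).1.length
      ∨ (w.foldl finddifficultyStepA ([], 0, 0, 0)).2.2.1 < (w.foldl finddifficultyStepA ([], 0, 0, 0)).2.1)
      ↔ (4 ≤ ((PySem.Chars.split₀ (w.map pvSub)).map List.length).foldl max 0
      ∨ (w.length : Int) - ((w.countP (fun c => !pvVowel c) : Nat) : Int)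
          < ((w.countP (fun c => !pvVowel c) : Nat) : Int)) := by
    rw [h2, h3, hgo]
    simp only [List.reverse_nil] at h1
    rw [← h1]
    constructor
    · rintro (h | h)
      · exact Or.inl h
      · right; omega
    · rintro (h | h)
      · exact Or.inl h
      · right; omega
  have hB : finddifficultyWordB (5 * d + 3 * e) w
      = 5 * d + 3 * e + (if 4 ≤ ((PySem.Chars.split₀ (w.map pvSub)).map List.length).foldl max 0
      ∨ (w.length : Int) - ((w.countP (fun c => !pvVowel c) : Nat) : Int)
          < ((w.countP (fun c => !pvVowel c) : Nat) : Int) then 5 else 3) := rfl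
  have hA : finddifficultyAccA (d, e) w
      = if (4 ≤ max (w.foldl finddifficultyStepA ([], 0, 0, 0)).2.2.2
        (w.foldl finddifficultyStepA ([], 0, 0, 0)).1.length
      ∨ (w.foldl finddifficultyStepA ([], 0, 0, 0)).2.2.1 < (w.foldl finddifficultyStepA ([], 0, 0, 0)).2.1)
        then (d + 1, e) else (d, e + 1) := rfl
  rw [hB, hA]
  by_cases hc : 4 ≤ max (w.foldl finddifficultyStepA ([], 0, 0, 0)).2.2.2
        (w.foldl finddifficultyStepA ([], 0, 0, 0)).1.length
      ∨ (w.foldl finddifficultyStepA ([], 0, 0, 0)).2.2.1 < (w.foldl finddifficultyStepA ([], 0, 0, 0)).2.1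
  · rw [if_pos hc, if_pos (hcond.mp hc)]
    show (5 * d + 3 * e + 5 : Int) = 5 * (d + 1) + 3 * e
    ring
  · rw [if_neg hc, if_neg (fun h => hc (hcond.mpr h))]
    show (5 * d + 3 * e + 3 : Int) = 5 * d + 3 * (e + 1)
    ring

-- outer loop: B's running total is 5*dif + 3*easy throughout
theorem pv_outer (l : List (List Char))
    (h : ∀ w ∈ l, ∀ c ∈ w, PySem.Chars.isspace c = false) :
    ∀ (d e : Int),
    l.foldl finddifficultyWordB (5 * d + 3 * e)
      = 5 * (l.foldl finddifficultyAccA (d, e)).1 + 3 * (l.foldl finddifficultyAccA (d, e)).2 := by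
  induction l with
  | nil => intro d e; simp
  | cons w rest ih =>
    intro d e
    have hw : ∀ c ∈ w, PySem.Chars.isspace c = false := h w List.mem_cons_self
    have hrest : ∀ u ∈ rest, ∀ c ∈ u, PySem.Chars.isspace c = false :=
      fun u hu => h u (List.mem_cons_of_mem _ hu)
    rw [List.foldl_cons, List.foldl_cons, pv_word w hw d e]
    obtain ⟨d', e'⟩ := finddifficultyAccA (d, e) w
    exact ih hrest d' e'

-- ===== VERDICT (by name: the statement is the Claim_ definition above) =====
theorem finddifficulty_spec : Claim_equal_finddifficulty := by
  intro s _
  show finddifficulty s = finddifficulty_alt s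
  have hA : finddifficulty s
      = 5 * ((PySem.Str.split₀ s).foldl (fun p x => finddifficultyAccA p x.toList) (0, 0)).1
      + 3 * ((PySem.Str.split₀ s).foldl (fun p x => finddifficultyAccA p x.toList) (0, 0)).2 := rfl
  have hB : finddifficulty_alt s
      = (PySem.Str.split₀ s).foldl (fun t w => finddifficultyWordB t w.toList) 0 := rfl
  have hmB := (List.foldl_map (f := String.toList) (g := finddifficultyWordB)
    (l := PySem.Str.split₀ s) (init := (0 : Int))).symm
  have hmA := (List.foldl_map (f := String.toList) (g := finddifficultyAccA)
    (l := PySem.Str.split₀ s) (init := ((0, 0) : Int × Int))).symm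
  rw [hA, hB, hmB, hmA, PySem.Str.split₀_map_toList]
  have h := pv_outer (PySem.Chars.split₀ s.toList) (pv_split₀_nospace s.toList) 0 0
  norm_num at h
  exact h.symm
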